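-- pv_equiv track=rewrite | github.com/mikaela-garde/Programmeringsteknik | Labbar/Lab2/my_module.py | bandit_language
-- ===== SOURCE A (Python) =====
-- def bandit_language(string):
--     consonant = ["b", "c", "d", "f", "g", "h", "j", "k", "l", "m", "n", "p", "q", "r", "s", "t", "v", "w", "x", "z"]
--     new_string = ""
--
--     for i in range(len(string)):
--         char = string[i]
--         if char in consonant:
--             char += "o" + string[i]
--         new_string += char
--     return new_string
-- ===== SOURCE B (Python) =====
-- _CONS = frozenset("bcdfghjklmnpqrstvwxz")
--
-- def bandit_language(string):
--     # Run-based: copy each maximal run of non-consonants wholesale as a slice,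
--     # then emit the expansion "c" + "o" + "c" for the consonant that stopped it.
--     pieces = []
--     i, n = 0, len(string)
--     while i < n:
--         j = i
--         while j < n and string[j] not in _CONS:
--             j += 1
--         pieces.append(string[i:j])
--         if j < n:
--             c = string[j]
--             pieces.append(c + "o" + c)
--             j += 1
--         i = j
--     return "".join(pieces)
-- ===== Notes on version B (the rewrite author's own statement) =====
-- stated objective: alternative
-- what changed: Replaces A's per-character index loop (membership test and string concatenation for every character) by a run-based scan that copies each maximal run of non-consonants wholesale as a slice, expands only the delimiting consonant, and joins the collected pieces once.
import Mathlib
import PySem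

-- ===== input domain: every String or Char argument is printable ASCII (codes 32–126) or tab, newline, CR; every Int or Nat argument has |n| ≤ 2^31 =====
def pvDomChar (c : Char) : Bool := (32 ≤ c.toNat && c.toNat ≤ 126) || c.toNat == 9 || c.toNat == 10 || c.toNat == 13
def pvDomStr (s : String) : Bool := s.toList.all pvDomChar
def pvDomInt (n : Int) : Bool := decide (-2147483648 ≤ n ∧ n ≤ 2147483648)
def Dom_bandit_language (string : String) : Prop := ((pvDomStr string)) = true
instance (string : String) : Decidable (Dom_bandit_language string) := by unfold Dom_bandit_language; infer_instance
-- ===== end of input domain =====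

-- B replaces A's per-character index loop by a run-based scan: each maximal run of
-- non-consonants is copied wholesale as one slice, only the consonant ending a run is
-- expanded to "c"+"o"+"c", and the collected pieces are joined once. Objective: alternative.

-- ===== PORT A =====
def bandit_language (string : String) : String :=
  let consonant : List Char := ['b', 'c', 'd', 'f', 'g', 'h', 'j', 'k', 'l', 'm', 'n', 'p', 'q', 'r', 's', 't', 'v', 'w', 'x', 'z']
  String.ofList ((PySem.List.pyRange 0 (PySem.Str.len string) 1).foldl
    (fun new_string i =>
      let char := PySem.List.pyGetD string.toList i ' '
      let char' : List Char :=
        if consonant.contains char then [char] ++ ['o'] ++ [PySem.List.pyGetD string.toList i ' ']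
        else [char]
      new_string ++ char') [])

-- ===== PORT B =====
def banditCons : List Char := ['b', 'c', 'd', 'f', 'g', 'h', 'j', 'k', 'l', 'm', 'n', 'p', 'q', 'r', 's', 't', 'v', 'w', 'x', 'z']

-- the outer while of Source B on the remaining suffix; the inner `while … not in _CONS` scan that
-- delimits the copied slice string[i:j] is the takeWhile/dropWhile split of the suffix
def banditPieces (l : List Char) : List (List Char) :=
  let run := l.takeWhile (fun c => !banditCons.contains c)
  match h : l.dropWhile (fun c => !banditCons.contains c) with
  | [] => [run]
  | c :: tail => run :: [c, 'o', c] :: banditPieces tail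
termination_by l.length
decreasing_by
  have hle : (l.dropWhile (fun c => !banditCons.contains c)).length ≤ l.length :=
    (List.dropWhile_sublist _).length_le
  rw [h] at hle
  simpa using Nat.lt_of_lt_of_le (Nat.lt_succ_self _) hle

-- "".join(pieces)
def bandit_language_alt (string : String) : String :=
  String.ofList (banditPieces string.toList).flatten

-- ===== PRECONDITION & SPEC =====
def Spec_bandit_language (string : String) (out : String) : Prop := out = bandit_language_alt string
instance (string : String) (out : String) : Decidable (Spec_bandit_language string out) := by unfold Spec_bandit_language; infer_instance

-- ===== CLAIM (what is proved, stated in full; the proofs are below) =====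
def Claim_equal_bandit_language : Prop := ∀ (string : String), Dom_bandit_language string → Spec_bandit_language string (bandit_language string)

-- ===== LEMMAS AND PROOFS =====

-- the per-character rewrite both programs realise
def banditChar (c : Char) : List Char :=
  if banditCons.contains c then [c] ++ ['o'] ++ [c] else [c]

-- A's index loop is the character-wise flatMap of banditChar
theorem bandit_language_eq_flatMap (string : String) :
    bandit_language string = String.ofList (string.toList.flatMap banditChar) := by
  show String.ofList ((PySem.List.pyRange 0 (PySem.Str.len string) 1).foldl
      (fun acc j => (fun acc ch => acc ++ banditChar ch) acc (PySem.List.pyGetD string.toList j ' ')) []) = _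
  rw [PySem.Str.len_eq,
    PySem.List.foldl_pyRange_zero_pyGetD' string.toList ' ' (fun acc ch => acc ++ banditChar ch) [],
    PySem.List.foldl_append_eq_flatMap]
  rfl

-- banditChar keeps a list of non-consonants unchanged
theorem flatMap_id_of (run : List Char) (hr : ∀ x ∈ run, banditCons.contains x = false) :
    run.flatMap banditChar = run := by
  induction run with
  | nil => rfl
  | cons a t ih =>
    have ha : ¬ a ∈ banditCons := by simpa using hr a (List.mem_cons_self ..)
    simp [List.flatMap_cons, banditChar, ha, ih fun x hx => hr x (List.mem_cons_of_mem _ hx)]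

-- every character of a copied run is a non-consonant
theorem take_run (l : List Char) :
    ∀ x ∈ l.takeWhile (fun c => !banditCons.contains c), banditCons.contains x = false := by
  intro x hx
  have := List.mem_takeWhile_imp (p := fun c => !banditCons.contains c) hx
  simpa using this

-- B's run-based scan flattens to the same character-wise flatMap
theorem banditPieces_flatten (l : List Char) :
    (banditPieces l).flatten = l.flatMap banditChar := by
  induction l using banditPieces.induct with
  | case1 l h =>
    rw [banditPieces]
    split
    case h_1 heq =>
      have hl := (List.takeWhile_append_dropWhile (p := fun c => !banditCons.contains c) (l := l))
      rw [heq, List.append_nil] at hl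
      conv_rhs => rw [← hl]
      rw [flatMap_id_of _ (take_run l)]
      simp
    case h_2 c2 t2 heq => rw [h] at heq; simp at heq
  | case2 l c tail h ih =>
    rw [banditPieces]
    split
    case h_1 heq => rw [h] at heq; simp at heq
    case h_2 c2 t2 heq =>
      rw [h] at heq
      cases heq
      have hl := (List.takeWhile_append_dropWhile (p := fun c => !banditCons.contains c) (l := l))
      rw [h] at hl
      have hc : banditCons.contains c = true := by
        have := List.head_dropWhile_not (p := fun c => !banditCons.contains c) (l := l)
        rw [h] at this; simpa using this (by simp)
      conv_rhs => rw [← hl]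
      rw [List.flatMap_append, flatMap_id_of _ (take_run l), List.flatMap_cons]
      simp [banditChar, show c ∈ banditCons from by simpa using hc, ih]

-- ===== VERDICT (by name: the statement is the Claim_ definition above) =====
theorem bandit_language_spec : Claim_equal_bandit_language := by
  intro s _
  unfold Spec_bandit_language bandit_language_alt
  rw [bandit_language_eq_flatMap, banditPieces_flatten]
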